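-- pv_equiv track=rewrite | github.com/DancingOnAir/LeetcodePythonSolution | Array/2456_most_popular_video_creator.py | mostPopularCreator1
-- ===== SOURCE A (Python) =====
-- from typing import List
--
-- def mostPopularCreator1(creators: List[str], ids: List[str], views: List[int]) -> List[List[str]]:
--     m = dict()
--     for i in range(len(creators)):
--         if creators[i] not in m:
--             m[creators[i]] = [i, views[i]]
--         else:
--             if views[i] > views[m[creators[i]][0]] or (views[i] == views[m[creators[i]][0]] and ids[i] < ids[m[creators[i]][0]]):
--                 m[creators[i]][0] = i
--             m[creators[i]][1] += views[i]
--
--     res = list()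
--     mx = max(m.values(), key=lambda x: x[1])
--     for k, v in m.items():
--         if v[1] == mx[1]:
--             res.append([k, ids[v[0]]])
--     return res
-- ===== SOURCE B (Python) =====
-- def mostPopularCreator1(creators, ids, views):
--     # group each video under its creator, then aggregate per creator in a second pass
--     groups = {}
--     for i in range(len(creators)):
--         groups.setdefault(creators[i], []).append((views[i], ids[i]))
--     totals = {c: sum(v for v, _ in g) for c, g in groups.items()}
--     mx = max(totals.values())
--     res = []
--     for c, g in groups.items():
--         if totals[c] == mx:
--             best = min(g, key=lambda e: (-e[0], e[1]))
--             res.append([c, best[1]])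
--     return res
-- ===== Notes on version B (the rewrite author's own statement) =====
-- stated objective: simpler
-- what changed: B first groups videos into creator -> list of (views,id) pairs and only afterwards computes each creator's total and best video in a separate aggregation pass, instead of A's single loop maintaining a running best-index and running sum per creator.
-- outside the precondition, e.g. on mostPopularCreator1(['a', 'a'], ['x'], [5, 1]): A returns [['a', 'x']], B raises IndexError
import Mathlib
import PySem

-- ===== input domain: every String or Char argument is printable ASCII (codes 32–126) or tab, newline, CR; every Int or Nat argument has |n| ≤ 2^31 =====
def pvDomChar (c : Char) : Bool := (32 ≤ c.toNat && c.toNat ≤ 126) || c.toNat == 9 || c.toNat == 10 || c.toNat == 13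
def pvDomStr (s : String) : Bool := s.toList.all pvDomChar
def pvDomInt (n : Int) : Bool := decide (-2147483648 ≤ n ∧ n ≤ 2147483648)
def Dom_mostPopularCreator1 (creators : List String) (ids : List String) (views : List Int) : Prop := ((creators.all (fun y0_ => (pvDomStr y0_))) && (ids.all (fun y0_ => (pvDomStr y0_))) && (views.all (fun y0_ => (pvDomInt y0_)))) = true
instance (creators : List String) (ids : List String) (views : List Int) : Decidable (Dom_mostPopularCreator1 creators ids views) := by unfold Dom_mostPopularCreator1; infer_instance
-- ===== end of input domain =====

-- ===== PORT A =====
-- B differs from A in one observable way: on ragged inputs (ids shorter than creators) A may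
-- still return where B raises; Pre_ excludes those (see Pre_ comment).
def mostPopularCreator1 (creators : List String) (ids : List String) (views : List Int) : List (List String) :=
  let m : PySem.Dict String (Int × Int) :=
    (List.range creators.length).foldl (fun m (i : Nat) =>
      let c := PySem.List.pyGetD creators (↑i) ""
      let v := PySem.List.pyGetD views (↑i) 0
      if m.contains c = false then
        m.insert c ((↑i : Int), v)
      else
        let p := m.getD c (0, 0)
        let p0 : Int :=
          if v > PySem.List.pyGetD views p.1 0 ∨
             (v = PySem.List.pyGetD views p.1 0 ∧
              PySem.List.pyGetD ids (↑i) "" < PySem.List.pyGetD ids p.1 "") then (↑i : Int)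
          else p.1
        m.insert c (p0, p.2 + v)) PySem.Dict.empty
  match PySem.List.max? m.values (fun x => x.2) with
  | none => []   -- Python raises ValueError here (creators = []); excluded by Pre_
  | some mx =>
    m.items.foldl (fun res kv =>
      if kv.2.2 = mx.2 then res ++ [[kv.1, PySem.List.pyGetD ids kv.2.1 ""]] else res) []

-- ===== PORT B =====
def mostPopularCreator1_alt (creators : List String) (ids : List String) (views : List Int) : List (List String) :=
  let groups : PySem.Dict String (List (Int × String)) :=
    (List.range creators.length).foldl (fun d (i : Nat) =>
      d.modify (PySem.List.pyGetD creators (↑i) "") []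
        (fun l => l ++ [(PySem.List.pyGetD views (↑i) 0, PySem.List.pyGetD ids (↑i) "")]))
      PySem.Dict.empty
  let totals : PySem.Dict String Int :=
    groups.items.foldl (fun t p => t.insert p.1 ((p.2.map (·.1)).sum)) PySem.Dict.empty
  match PySem.List.max? totals.values (fun x => x) with
  | none => []   -- Python raises ValueError here (creators = []); excluded by Pre_
  | some mx =>
    groups.items.foldl (fun res p =>
      if totals.getD p.1 0 = mx then
        match PySem.List.min2? p.2 (fun e => -e.1) (fun e => e.2) with
        | none => res   -- unreachable: every group is nonempty
        | some b => res ++ [[p.1, b.2]]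
      else res) []

-- ===== PRECONDITION & SPEC =====
-- Pre_ excludes the inputs where Python A raises: creators = [] (ValueError from max) and
-- views shorter than creators (IndexError). The ids-length bound additionally excludes some
-- ragged inputs on which A happens to return (its tie branch and final ids[v[0]] may stay in
-- range) while B, which reads ids[i] for every video, raises IndexError there.
def Pre_mostPopularCreator1 (creators : List String) (ids : List String) (views : List Int) : Prop :=
  creators ≠ [] ∧ creators.length ≤ ids.length ∧ creators.length ≤ views.length
instance (creators : List String) (ids : List String) (views : List Int) : Decidable (Pre_mostPopularCreator1 creators ids views) := by unfold Pre_mostPopularCreator1; infer_instance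
def pvWitness_mostPopularCreator1 : List String × List String × List Int := (["a", "b", "a"], ["u", "v", "w"], [3, 5, 2])

def Spec_mostPopularCreator1 (creators : List String) (ids : List String) (views : List Int) (out : List (List String)) : Prop := out = mostPopularCreator1_alt creators ids views
instance (creators : List String) (ids : List String) (views : List Int) (out : List (List String)) : Decidable (Spec_mostPopularCreator1 creators ids views out) := by unfold Spec_mostPopularCreator1; infer_instance

-- ===== CLAIM (what is proved, stated in full; the proofs are below) =====
def Claim_equal_mostPopularCreator1 : Prop := ∀ (creators : List String) (ids : List String) (views : List Int), Dom_mostPopularCreator1 creators ids views → Pre_mostPopularCreator1 creators ids views → Spec_mostPopularCreator1 creators ids views (mostPopularCreator1 creators ids views)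

-- ===== LEMMAS AND PROOFS =====

def pvC (creators : List String) (i : Nat) : String := PySem.List.pyGetD creators (↑i) ""
def pvV (views : List Int) (i : Nat) : Int := PySem.List.pyGetD views (↑i) 0
def pvI (ids : List String) (i : Nat) : String := PySem.List.pyGetD ids (↑i) ""
def pvGrp (creators : List String) (ids : List String) (views : List Int) (n : Nat) (c : String) : List (Int × String) :=
  ((List.range n).filter (fun i => pvC creators i == c)).map (fun i => (pvV views i, pvI ids i))
def pvGB (creators : List String) (ids : List String) (views : List Int) (n : Nat) : PySem.Dict String (List (Int × String)) :=
  (List.range n).foldl (fun d i =>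
    d.modify (pvC creators i) [] (fun l => l ++ [(pvV views i, pvI ids i)])) PySem.Dict.empty

lemma pvGB_getD (creators ids : List String) (views : List Int) (n : Nat) (c : String) :
    (pvGB creators ids views n).getD c [] = pvGrp creators ids views n c := by
  unfold pvGB pvGrp
  have h := List.foldl_map (f := fun j : Nat => (pvC creators j, (pvV views j, pvI ids j)))
    (g := fun (d : PySem.Dict String (List (Int × String))) (p : String × (Int × String)) =>
      d.modify p.1 [] (fun l => l ++ [p.2]))
    (l := List.range n) (init := (PySem.Dict.empty : PySem.Dict String (List (Int × String))))
  show (List.foldl (fun d i => (fun (d : PySem.Dict String (List (Int × String))) (p : String × (Int × String)) => d.modify p.1 [] (fun l => l ++ [p.2])) d ((fun j => (pvC creators j, (pvV views j, pvI ids j))) i)) PySem.Dict.empty (List.range n)).getD c [] = _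
  rw [← h, PySem.Dict.getD_foldl_modify_append]
  simp [List.filter_map, Function.comp_def]

lemma pvGrp_eq_nil_of_not_mem (creators ids : List String) (views : List Int) (n : Nat) (c : String)
    (h : c ∉ (List.range n).map (pvC creators)) : pvGrp creators ids views n c = [] := by
  unfold pvGrp
  rw [List.filter_eq_nil_iff.2, List.map_nil]
  intro i hi
  simp only [beq_iff_eq]
  intro hc; exact h (List.mem_map.2 ⟨i, hi, hc⟩)

lemma pvGrp_ne_nil_of_mem (creators ids : List String) (views : List Int) (n : Nat) (c : String)
    (h : c ∈ (List.range n).map (pvC creators)) : pvGrp creators ids views n c ≠ [] := by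
  unfold pvGrp
  obtain ⟨i, hi, hc⟩ := List.mem_map.1 h
  intro hnil
  have : i ∈ (List.range n).filter (fun i => pvC creators i == c) :=
    List.mem_filter.2 ⟨hi, by simp [hc]⟩
  rw [List.map_eq_nil_iff.1 hnil] at this
  exact absurd this (List.not_mem_nil)

lemma pvMax_key_congr {α β : Type} {k₁ : α → Int} {k₂ : β → Int} :
    ∀ (l₁ : List α) (l₂ : List β) (a₁ : Option α) (a₂ : Option β),
      l₁.map k₁ = l₂.map k₂ → a₁.map k₁ = a₂.map k₂ →
      (List.foldl (fun acc x => match acc with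
        | none => some x
        | some m => if k₁ m < k₁ x then some x else some m) a₁ l₁).map k₁ =
      (List.foldl (fun acc x => match acc with
        | none => some x
        | some m => if k₂ m < k₂ x then some x else some m) a₂ l₂).map k₂ := by
  intro l₁
  induction l₁ with
  | nil => intro l₂ a₁ a₂ hl ha; cases l₂ with
    | nil => simpa using ha
    | cons y t => simp at hl
  | cons x t ih =>
    intro l₂ a₁ a₂ hl ha
    cases l₂ with
    | nil => simp at hl
    | cons y t₂ =>
      simp only [List.map_cons, List.cons.injEq] at hl
      obtain ⟨hxy, ht⟩ := hl
      simp only [List.foldl_cons]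
      apply ih _ _ _ ht
      cases a₁ with
      | none => cases a₂ with
        | none => simp [hxy]
        | some m₂ => simp at ha
      | some m₁ => cases a₂ with
        | none => simp at ha
        | some m₂ =>
          simp only [Option.map_some, Option.some.injEq] at ha
          simp only [ha, hxy]
          split <;> simp [hxy, ha]

def pvAf (creators : List String) (ids : List String) (views : List Int)
    (m : PySem.Dict String (Int × Int)) (i : Nat) : Int × Int :=
  if m.contains (pvC creators i) = false then ((↑i : Int), pvV views i)
  else
    (if pvV views i > PySem.List.pyGetD views (m.getD (pvC creators i) (0, 0)).1 0 ∨
        (pvV views i = PySem.List.pyGetD views (m.getD (pvC creators i) (0, 0)).1 0 ∧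
         pvI ids i < PySem.List.pyGetD ids (m.getD (pvC creators i) (0, 0)).1 "") then (↑i : Int)
     else (m.getD (pvC creators i) (0, 0)).1,
     (m.getD (pvC creators i) (0, 0)).2 + pvV views i)

def pvMA (creators : List String) (ids : List String) (views : List Int) (n : Nat) : PySem.Dict String (Int × Int) :=
  (List.range n).foldl (fun m i => m.insert (pvC creators i) (pvAf creators ids views m i)) PySem.Dict.empty

lemma pvMA_keys (creators ids : List String) (views : List Int) (n : Nat) :
    (pvMA creators ids views n).keys = PySem.Set.ofList ((List.range n).map (pvC creators)) := by
  unfold pvMA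
  rw [PySem.Dict.keys_foldl_insert_key (List.range n) (pvC creators) (pvAf creators ids views) PySem.Dict.empty]
  simp [PySem.Set.update_nil_left]

lemma min2_append_some {α κ₁ κ₂ : Type} [LT κ₁] [DecidableLT κ₁] [LT κ₂] [DecidableLT κ₂]
    {l : List α} {e m : α} {k1 : α → κ₁} {k2 : α → κ₂}
    (h : PySem.List.min2? l k1 k2 = some m) :
    PySem.List.min2? (l ++ [e]) k1 k2 =
      if (decide (k1 e < k1 m) || (!decide (k1 m < k1 e) && decide (k2 e < k2 m))) = true
      then some e else some m := by
  unfold PySem.List.min2? at h ⊢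
  rw [List.foldl_append, h]
  rfl

lemma min2_foldl_some {α κ₁ κ₂ : Type} [LT κ₁] [DecidableLT κ₁] [LT κ₂] [DecidableLT κ₂]
    {k1 : α → κ₁} {k2 : α → κ₂} :
    ∀ (l : List α) (a : α),
      ∃ b, List.foldl (fun acc x => match acc with
        | none => some x
        | some m => if (decide (k1 x < k1 m) || (!decide (k1 m < k1 x) && decide (k2 x < k2 m))) = true
            then some x else some m) (some a) l = some b := by
  intro l
  induction l with
  | nil => exact fun a => ⟨a, rfl⟩
  | cons x t ih =>
    intro a
    simp only [List.foldl_cons]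
    split <;> exact ih _

lemma min2_ne_nil {α κ₁ κ₂ : Type} [LT κ₁] [DecidableLT κ₁] [LT κ₂] [DecidableLT κ₂]
    (l : List α) (k1 : α → κ₁) (k2 : α → κ₂) (h : l ≠ []) :
    ∃ b, PySem.List.min2? l k1 k2 = some b := by
  cases l with
  | nil => exact absurd rfl h
  | cons x t => exact min2_foldl_some t x

lemma pvGrp_succ (creators ids : List String) (views : List Int) (n : Nat) (c : String) :
    pvGrp creators ids views (n+1) c =
      pvGrp creators ids views n c ++
        (if pvC creators n == c then [(pvV views n, pvI ids n)] else []) := by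
  unfold pvGrp
  rw [List.range_succ, List.filter_append, List.map_append]
  congr 1
  simp only [List.filter_cons, List.filter_nil]
  split <;> simp

lemma pvMA_getD (creators ids : List String) (views : List Int) (n : Nat) :
    ∀ c ∈ (pvMA creators ids views n).keys,
      ((pvMA creators ids views n).getD c (0, 0)).2
          = ((pvGrp creators ids views n c).map (·.1)).sum ∧
      ∃ b, PySem.List.min2? (pvGrp creators ids views n c) (fun e => -e.1) (fun e => e.2) = some b ∧
        PySem.List.pyGetD views ((pvMA creators ids views n).getD c (0, 0)).1 0 = b.1 ∧
        PySem.List.pyGetD ids ((pvMA creators ids views n).getD c (0, 0)).1 "" = b.2 := by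
  induction n with
  | zero =>
    intro c hc
    simp [pvMA, PySem.Dict.keys, PySem.Dict.empty] at hc
  | succ n ih =>
    have hstep : pvMA creators ids views (n+1)
        = (pvMA creators ids views n).insert (pvC creators n)
            (pvAf creators ids views (pvMA creators ids views n) n) := by
      unfold pvMA; rw [List.range_succ, List.foldl_append]; rfl
    intro c hc
    rw [hstep] at hc
    rw [hstep, pvGrp_succ]
    by_cases hcc : c = pvC creators n
    · subst hcc
      rw [PySem.Dict.getD_insert_self]
      simp only [beq_self_eq_true, if_true]
      by_cases hcont : (pvMA creators ids views n).contains (pvC creators n) = false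
      · -- first occurrence: the group so far is empty
        have hnm : pvC creators n ∉ (List.range n).map (pvC creators) := by
          intro hmem
          rw [← PySem.Set.mem_ofList, ← pvMA_keys creators ids views n,
            ← PySem.Dict.contains_iff_mem_keys] at hmem
          rw [hcont] at hmem; exact absurd hmem (by simp)
        rw [pvGrp_eq_nil_of_not_mem creators ids views n _ hnm]
        unfold pvAf
        rw [if_pos hcont]
        refine ⟨by simp, ⟨(pvV views n, pvI ids n), ?_, rfl, rfl⟩⟩
        simp [PySem.List.min2?]
      · -- repeat occurrence: use the invariant
        have hcont' : (pvMA creators ids views n).contains (pvC creators n) = true := by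
          revert hcont; cases (pvMA creators ids views n).contains (pvC creators n) <;> simp
        have hmem : pvC creators n ∈ (pvMA creators ids views n).keys :=
          (PySem.Dict.contains_iff_mem_keys _ _).1 hcont'
        obtain ⟨hsum, b, hb, hbv, hbi⟩ := ih _ hmem
        unfold pvAf
        rw [if_neg hcont, min2_append_some hb]
        set q := (pvMA creators ids views n).getD (pvC creators n) (0, 0) with hq
        refine ⟨by simpa using congrArg (· + pvV views n) hsum, ?_⟩
        have hcond : (pvV views n > PySem.List.pyGetD views q.1 0 ∨
            (pvV views n = PySem.List.pyGetD views q.1 0 ∧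
             pvI ids n < PySem.List.pyGetD ids q.1 ""))
            ↔ ((decide ((fun e => -e.1) (pvV views n, pvI ids n) < (fun e => -e.1) b)
                || (!decide ((fun e => -e.1) b < (fun e => -e.1) (pvV views n, pvI ids n))
                    && decide ((fun e => e.2) (pvV views n, pvI ids n) < (fun e => e.2) b))) = true) := by
          rw [hbv, hbi]
          simp only [gt_iff_lt, Bool.or_eq_true, decide_eq_true_eq, Bool.and_eq_true,
            Bool.not_eq_true', decide_eq_false_iff_not, not_lt, neg_lt_neg_iff]
          constructor
          · rintro (h | ⟨h1, h2⟩)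
            · exact Or.inl h
            · exact Or.inr ⟨le_of_eq h1.symm, h2⟩
          · rintro (h | ⟨h1, h2⟩)
            · exact Or.inl h
            · rcases lt_or_eq_of_le h1 with h1' | h1'
              · exact Or.inl h1'
              · exact Or.inr ⟨h1'.symm, h2⟩
        by_cases hA : (pvV views n > PySem.List.pyGetD views q.1 0 ∨
            (pvV views n = PySem.List.pyGetD views q.1 0 ∧
             pvI ids n < PySem.List.pyGetD ids q.1 ""))
        · rw [if_pos hA, if_pos (hcond.1 hA)]
          exact ⟨(pvV views n, pvI ids n), rfl, rfl, rfl⟩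
        · rw [if_neg hA, if_neg (fun hx => hA (hcond.2 hx))]
          exact ⟨b, rfl, hbv, hbi⟩
    · -- other creators are untouched this step
      have hc' : c ∈ (pvMA creators ids views n).keys := by
        rcases (PySem.Dict.mem_keys_insert _ _ _ _).1 hc with h | h
        · exact absurd h hcc
        · exact h
      rw [PySem.Dict.getD_insert_of_ne _ _ _ hcc]
      have hbeq : (pvC creators n == c) = false := by
        simp only [beq_eq_false_iff_ne, ne_eq]
        exact fun h => hcc h.symm
      rw [hbeq]
      simp only [Bool.false_eq_true, if_false, List.append_nil]
      exact ih _ hc'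

lemma pvGB_keys (creators ids : List String) (views : List Int) (n : Nat) :
    (pvGB creators ids views n).keys = PySem.Set.ofList ((List.range n).map (pvC creators)) := by
  unfold pvGB
  rw [PySem.Dict.keys_foldl_modify_key (List.range n) (pvC creators) []
    (fun _ i => fun l => l ++ [(pvV views i, pvI ids i)]) PySem.Dict.empty]
  simp [PySem.Set.update_nil_left]

def pvBest (lst : List (Int × String)) : String :=
  match PySem.List.min2? lst (fun e => -e.1) (fun e => e.2) with
  | none => ""
  | some b => b.2

def pvTot (creators ids : List String) (views : List Int) (n : Nat) : PySem.Dict String Int :=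
  (pvGB creators ids views n).items.foldl (fun t p => t.insert p.1 ((p.2.map (·.1)).sum)) PySem.Dict.empty

lemma pvA_eq (creators ids : List String) (views : List Int) :
    mostPopularCreator1 creators ids views =
      match PySem.List.max? (pvMA creators ids views creators.length).values (fun x => x.2) with
      | none => []
      | some mx =>
        (pvMA creators ids views creators.length).items.foldl (fun res kv =>
          if kv.2.2 = mx.2 then res ++ [[kv.1, PySem.List.pyGetD ids kv.2.1 ""]] else res) [] := by
  unfold mostPopularCreator1 pvMA
  have hbody : (fun (m : PySem.Dict String (Int × Int)) (i : Nat) =>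
      let c := PySem.List.pyGetD creators (↑i) ""
      let v := PySem.List.pyGetD views (↑i) 0
      if m.contains c = false then
        m.insert c ((↑i : Int), v)
      else
        let p := m.getD c (0, 0)
        let p0 : Int :=
          if v > PySem.List.pyGetD views p.1 0 ∨
             (v = PySem.List.pyGetD views p.1 0 ∧
              PySem.List.pyGetD ids (↑i) "" < PySem.List.pyGetD ids p.1 "") then (↑i : Int)
          else p.1
        m.insert c (p0, p.2 + v))
      = fun m i => m.insert (pvC creators i) (pvAf creators ids views m i) := by
    funext m i
    simp only [pvAf, pvC, pvV, pvI]
    by_cases h : m.contains (PySem.List.pyGetD creators (↑i) "") = false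
    · rw [if_pos h, if_pos h]
    · rw [if_neg h, if_neg h]
  rw [hbody]

lemma pvB_eq (creators ids : List String) (views : List Int) :
    mostPopularCreator1_alt creators ids views =
      match PySem.List.max? (pvTot creators ids views creators.length).values (fun x => x) with
      | none => []
      | some mx =>
        (pvGB creators ids views creators.length).items.foldl (fun res p =>
          if (pvTot creators ids views creators.length).getD p.1 0 = mx then
            match PySem.List.min2? p.2 (fun e => -e.1) (fun e => e.2) with
            | none => res
            | some b => res ++ [[p.1, b.2]]
          else res) [] := by
  unfold mostPopularCreator1_alt pvTot pvGB pvC pvV pvI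
  rfl

theorem main_equal (creators ids : List String) (views : List Int) (hne : creators ≠ []) :
    mostPopularCreator1 creators ids views = mostPopularCreator1_alt creators ids views := by
  rw [pvA_eq, pvB_eq]
  set n := creators.length with hn
  set S := PySem.Set.ofList ((List.range n).map (pvC creators)) with hS
  have hKA := pvMA_keys creators ids views n
  have hKB := pvGB_keys creators ids views n
  have hndS : S.Nodup := PySem.Set.nodup_ofList _
  have hndA : (pvMA creators ids views n).keys.Nodup := by rw [hKA]; exact hndS
  have hndB : (pvGB creators ids views n).keys.Nodup := by rw [hKB]; exact hndS
  -- items of both dicts as maps over the common key list S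
  have hItemsA : (pvMA creators ids views n).items
      = S.map (fun c => (c, (pvMA creators ids views n).getD c (0, 0))) := by
    rw [PySem.Dict.items_eq_map_keys _ hndA (0, 0), hKA]
  have hItemsB : (pvGB creators ids views n).items
      = S.map (fun c => (c, pvGrp creators ids views n c)) := by
    rw [PySem.Dict.items_eq_map_keys _ hndB [], hKB]
    exact List.map_congr_left (fun c _ => by rw [pvGB_getD])
  -- totals
  have hTotItems : (pvTot creators ids views n).items
      = S.map (fun c => (c, ((pvGrp creators ids views n c).map (·.1)).sum)) := by
    unfold pvTot
    have hfresh : ∀ a ∈ (pvGB creators ids views n).items,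
        (PySem.Dict.empty : PySem.Dict String Int).contains a.1 = false :=
      fun a _ => PySem.Dict.contains_empty a.1
    have hnodup : ((pvGB creators ids views n).items.map (fun p => p.1)).Nodup := by
      rw [show (pvGB creators ids views n).items.map (fun p => p.1)
        = (pvGB creators ids views n).keys from rfl, hKB]
      exact hndS
    have hins := PySem.Dict.items_foldl_insert_fresh
      (l := (pvGB creators ids views n).items)
      (k := fun p => p.1) (v := fun p => ((p.2.map (·.1)).sum))
      (d := (PySem.Dict.empty : PySem.Dict String Int)) hfresh hnodup
    rw [hins, hItemsB]
    simp [List.map_map, Function.comp_def, PySem.Dict.empty]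
  have hTotKeysNodup : (pvTot creators ids views n).keys.Nodup := by
    show ((pvTot creators ids views n).items.map (fun p => p.1)).Nodup
    rw [hTotItems]
    simpa [List.map_map, Function.comp_def] using hndS
  have hTotGetD : ∀ c ∈ S, (pvTot creators ids views n).getD c 0
      = ((pvGrp creators ids views n c).map (·.1)).sum := by
    intro c hc
    refine PySem.Dict.getD_of_mem_items _ ?_ hTotKeysNodup 0
    rw [hTotItems]
    exact List.mem_map.2 ⟨c, hc, rfl⟩
  -- key-sequence equality of the two max? scans
  have hmemS : ∀ c ∈ S, c ∈ (pvMA creators ids views n).keys := fun c hc => by rw [hKA]; exact hc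
  have hValsA : (pvMA creators ids views n).values
      = S.map (fun c => (pvMA creators ids views n).getD c (0, 0)) := by
    show (pvMA creators ids views n).items.map (fun p => p.2) = _
    rw [hItemsA, List.map_map]; rfl
  have hValsT : (pvTot creators ids views n).values
      = S.map (fun c => ((pvGrp creators ids views n c).map (·.1)).sum) := by
    show (pvTot creators ids views n).items.map (fun p => p.2) = _
    rw [hTotItems, List.map_map]; rfl
  have hkeyseq : ((pvMA creators ids views n).values).map (fun x => x.2)
      = ((pvTot creators ids views n).values).map (fun x => x) := by
    rw [hValsA, hValsT, List.map_map, List.map_map]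
    exact List.map_congr_left (fun c hc => (pvMA_getD creators ids views n c (hmemS c hc)).1)
  have hmaxeq : (PySem.List.max? (pvMA creators ids views n).values (fun x => x.2)).map (fun x => x.2)
      = (PySem.List.max? (pvTot creators ids views n).values (fun x => x)).map (fun x => x) := by
    unfold PySem.List.max?
    exact pvMax_key_congr _ _ none none hkeyseq rfl
  -- both lists are nonempty
  have hSne : S ≠ [] := by
    have h0 : 0 < n := by
      rw [hn]; exact List.length_pos_iff.2 hne
    have : pvC creators 0 ∈ S := by
      rw [hS, PySem.Set.mem_ofList]
      exact List.mem_map.2 ⟨0, List.mem_range.2 h0, rfl⟩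
    exact List.ne_nil_of_mem this
  have hVAne : (pvMA creators ids views n).values ≠ [] := by
    rw [hValsA]; simpa using hSne
  have hVTne : (pvTot creators ids views n).values ≠ [] := by
    rw [hValsT]; simpa using hSne
  obtain ⟨mxA, hmxA⟩ : ∃ mxA, PySem.List.max? (pvMA creators ids views n).values (fun x => x.2) = some mxA := by
    cases h : PySem.List.max? (pvMA creators ids views n).values (fun x => x.2) with
    | none => exact absurd ((PySem.List.max?_eq_none_iff _ _).1 h) hVAne
    | some m => exact ⟨m, rfl⟩
  obtain ⟨mxT, hmxT⟩ : ∃ mxT, PySem.List.max? (pvTot creators ids views n).values (fun x => x) = some mxT := by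
    cases h : PySem.List.max? (pvTot creators ids views n).values (fun x => x) with
    | none => exact absurd ((PySem.List.max?_eq_none_iff _ _).1 h) hVTne
    | some m => exact ⟨m, rfl⟩
  have hmx2 : mxA.2 = mxT := by
    rw [hmxA, hmxT] at hmaxeq
    simpa using hmaxeq
  rw [hmxA, hmxT]
  dsimp only
  -- final accumulation loops
  have hfoldA := PySem.List.foldl_append_ite
    (p := fun kv : String × (Int × Int) => kv.2.2 = mxA.2)
    (f := fun kv : String × (Int × Int) => [kv.1, PySem.List.pyGetD ids kv.2.1 ""])
    ((pvMA creators ids views n).items) []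
  rw [hfoldA]
  have hcongr : ∀ (res : List (List String)), ∀ p ∈ (pvGB creators ids views n).items,
      (if (pvTot creators ids views n).getD p.1 0 = mxT then
        match PySem.List.min2? p.2 (fun e => -e.1) (fun e => e.2) with
        | none => res
        | some b => res ++ [[p.1, b.2]]
      else res)
      = (if (pvTot creators ids views n).getD p.1 0 = mxT then res ++ [[p.1, pvBest p.2]] else res) := by
    intro res p hp
    rw [hItemsB] at hp
    obtain ⟨c, hc, rfl⟩ := List.mem_map.1 hp
    have hgne : pvGrp creators ids views n c ≠ [] := by
      apply pvGrp_ne_nil_of_mem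
      rw [← PySem.Set.mem_ofList]; exact hc
    obtain ⟨b, hb⟩ := min2_ne_nil _ (fun e : Int × String => -e.1) (fun e : Int × String => e.2) hgne
    simp only [hb, pvBest]
  rw [PySem.List.foldl_congr_mem _ _ _ _ (fun res p hp => hcongr res p hp)]
  have hfoldB := PySem.List.foldl_append_ite
    (p := fun p : String × List (Int × String) => (pvTot creators ids views n).getD p.1 0 = mxT)
    (f := fun p : String × List (Int × String) => [p.1, pvBest p.2])
    ((pvGB creators ids views n).items) []
  rw [hfoldB]
  rw [hItemsA, hItemsB, List.filter_map, List.filter_map, List.map_map, List.map_map]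
  simp only [Function.comp_def]
  have hfilter : (S.filter (fun c => decide (((pvMA creators ids views n).getD c (0, 0)).2 = mxA.2)))
      = (S.filter (fun c => decide ((pvTot creators ids views n).getD c 0 = mxT))) := by
    refine List.filter_congr (fun c hc => ?_)
    rw [(pvMA_getD creators ids views n c (hmemS c hc)).1, hTotGetD c hc, hmx2]
  rw [hfilter]
  refine congrArg _ (List.map_congr_left (fun c hc => ?_))
  have hcS : c ∈ S := List.mem_of_mem_filter hc
  obtain ⟨_, b, hb, hbv, hbi⟩ := pvMA_getD creators ids views n c (hmemS c hcS)
  rw [hbi]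
  unfold pvBest
  rw [hb]

-- ===== VERDICT (by name: the statement is the Claim_ definition above) =====
theorem mostPopularCreator1_spec : Claim_equal_mostPopularCreator1 := by
  intro creators ids views _ hpre
  unfold Spec_mostPopularCreator1
  exact main_equal creators ids views hpre.1
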